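-- pv_equiv track=rewrite | github.com/Brown-University-Library/aeon_webfolder_comparison_project | d__generate_assessment.py | summarize_matched_terms
-- ===== SOURCE A (Python) =====
-- def summarize_matched_terms(patterns: list[str]) -> list[str]:
--     # compact regex patterns into human-friendly tokens
--     tokens: list[str] = []
--     for p in patterns:
--         if 'Brown Digital Repository' in p:
--             tokens.append('Brown Digital Repository')
--         elif 'library\\.brown\\.edu' in p:
--             tokens.append('library.brown.edu')
--         elif 'search\\.library\\.brown\\.edu' in p:
--             tokens.append('search.library.brown.edu')
--         elif 'BruKnow' in p:
--             tokens.append('BruKnow')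
--         elif 'John\\s*Hay' in p:
--             tokens.append('John Hay')
--         elif '\\bJHL\\b' in p:
--             tokens.append('JHL')
--         elif 'Annex Hay' in p:
--             tokens.append('Annex Hay')
--         elif '\\bBrown\\b' in p:
--             tokens.append('Brown')
--         elif '\\bHay\\b' in p:
--             tokens.append('Hay')
--         else:
--             tokens.append(p)
--     # preserve order but unique
--     seen: set[str] = set()
--     out: list[str] = []
--     for t in tokens:
--         if t not in seen:
--             seen.add(t)
--             out.append(t)
--     return out
-- ===== SOURCE B (Python) =====
-- _TABLE = [
--     ('Brown Digital Repository', 'Brown Digital Repository'),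
--     ('library\\.brown\\.edu', 'library.brown.edu'),
--     ('search\\.library\\.brown\\.edu', 'search.library.brown.edu'),
--     ('BruKnow', 'BruKnow'),
--     ('John\\s*Hay', 'John Hay'),
--     ('\\bJHL\\b', 'JHL'),
--     ('Annex Hay', 'Annex Hay'),
--     ('\\bBrown\\b', 'Brown'),
--     ('\\bHay\\b', 'Hay'),
-- ]
--
--
-- def _token(p, table):
--     # recursion over the needle->token table instead of a branch cascade
--     if not table:
--         return p
--     needle, tok = table[0]
--     return tok if needle in p else _token(p, table[1:])
--
--
-- def summarize_matched_terms(patterns: list[str]) -> list[str]: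
--     # dict.fromkeys keeps first occurrences in insertion order: no seen-set loop
--     return list(dict.fromkeys(_token(p, _TABLE) for p in patterns))
-- ===== Notes on version B (the rewrite author's own statement) =====
-- stated objective: idiomatic
-- what changed: Tokenizes by structural recursion over a needle->token table instead of the nine-branch if/elif cascade, and replaces the hand-written seen-set deduplication loop with the standard-library idiom list(dict.fromkeys(...)).
import Mathlib
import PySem

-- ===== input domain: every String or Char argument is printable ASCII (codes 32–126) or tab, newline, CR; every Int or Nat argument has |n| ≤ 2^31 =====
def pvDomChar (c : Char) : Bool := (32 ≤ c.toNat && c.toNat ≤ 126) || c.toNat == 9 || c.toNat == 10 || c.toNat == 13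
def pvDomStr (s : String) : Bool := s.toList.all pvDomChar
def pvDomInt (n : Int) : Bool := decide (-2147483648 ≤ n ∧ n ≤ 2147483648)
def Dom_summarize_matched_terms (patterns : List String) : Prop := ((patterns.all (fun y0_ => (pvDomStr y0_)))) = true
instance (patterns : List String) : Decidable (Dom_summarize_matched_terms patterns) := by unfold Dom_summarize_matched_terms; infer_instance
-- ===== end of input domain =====

-- B tokenizes by structural recursion over a needle->token table (not an if/elif cascade) and deduplicates with the dict.fromkeys idiom instead of a hand-written seen-set loop: idiomatic alternative, same result.


-- ===== PORT A =====
-- A's if/elif cascade, one pattern -> one token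
def pvTokenA (p : String) : String :=
  if PySem.Str.isIn "Brown Digital Repository" p then "Brown Digital Repository"
  else if PySem.Str.isIn "library\\.brown\\.edu" p then "library.brown.edu"
  else if PySem.Str.isIn "search\\.library\\.brown\\.edu" p then "search.library.brown.edu"
  else if PySem.Str.isIn "BruKnow" p then "BruKnow"
  else if PySem.Str.isIn "John\\s*Hay" p then "John Hay"
  else if PySem.Str.isIn "\\bJHL\\b" p then "JHL"
  else if PySem.Str.isIn "Annex Hay" p then "Annex Hay"
  else if PySem.Str.isIn "\\bBrown\\b" p then "Brown"
  else if PySem.Str.isIn "\\bHay\\b" p then "Hay"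
  else p

def summarize_matched_terms (patterns : List String) : List String :=
  -- first loop: build tokens
  let tokens : List String := patterns.foldl (fun acc p => acc ++ [pvTokenA p]) []
  -- second loop: preserve order but unique, with a 'seen' set
  let st : PySem.Set String × List String :=
    tokens.foldl
      (fun st t =>
        if ¬ (PySem.Set.contains st.1 t) then (PySem.Set.add st.1 t, st.2 ++ [t]) else st)
      (PySem.Set.empty, [])
  st.2

-- ===== PORT B =====
def pvTable : List (String × String) :=
  [("Brown Digital Repository", "Brown Digital Repository"),
   ("library\\.brown\\.edu", "library.brown.edu"),
   ("search\\.library\\.brown\\.edu", "search.library.brown.edu"),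
   ("BruKnow", "BruKnow"),
   ("John\\s*Hay", "John Hay"),
   ("\\bJHL\\b", "JHL"),
   ("Annex Hay", "Annex Hay"),
   ("\\bBrown\\b", "Brown"),
   ("\\bHay\\b", "Hay")]

-- recursion over the needle->token table
def pvTokenB (p : String) : List (String × String) → String
  | [] => p
  | (needle, tok) :: rest => if PySem.Str.isIn needle p then tok else pvTokenB p rest

def summarize_matched_terms_alt (patterns : List String) : List String :=
  -- list(dict.fromkeys(...)) = PySem.List.dedup (first occurrences, in order)
  PySem.List.dedup (patterns.map (fun p => pvTokenB p pvTable))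

-- ===== PRECONDITION & SPEC =====
def Spec_summarize_matched_terms (patterns : List String) (out : List String) : Prop := out = summarize_matched_terms_alt patterns
instance (patterns : List String) (out : List String) : Decidable (Spec_summarize_matched_terms patterns out) := by unfold Spec_summarize_matched_terms; infer_instance

-- ===== CLAIM (what is proved, stated in full; the proofs are below) =====
def Claim_equal_summarize_matched_terms : Prop := ∀ (patterns : List String), Dom_summarize_matched_terms patterns → Spec_summarize_matched_terms patterns (summarize_matched_terms patterns)

-- ===== LEMMAS AND PROOFS =====

-- B's table recursion computes exactly A's if/elif cascade
theorem pv_token_eq (p : String) : pvTokenB p pvTable = pvTokenA p := by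
  simp only [pvTable, pvTokenB, pvTokenA]

-- invariant of A's dedup loop: started with out equal to the seen set's element list,
-- both components stay equal and evolve by PySem.Set.add
theorem pv_fold_pair (ts : List String) (s : PySem.Set String) :
    ts.foldl
      (fun st t =>
        if ¬ (PySem.Set.contains st.1 t) then (PySem.Set.add st.1 t, st.2 ++ [t]) else st)
      (s, s)
    = (ts.foldl PySem.Set.add s, ts.foldl PySem.Set.add s) := by
  induction ts generalizing s with
  | nil => rfl
  | cons t ts ih =>
    by_cases hc : PySem.Set.contains s t = true
    · have hm : t ∈ s := by simpa using hc
      have hadd : PySem.Set.add s t = s := by simp [PySem.Set.add, hm]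
      simp only [List.foldl_cons, hadd]
      rw [if_neg (by simp [hm])]
      exact ih s
    · have hcb : PySem.Set.contains s t = false := eq_false_of_ne_true hc
      have hnm : t ∉ s := by simpa using hcb
      have hadd : PySem.Set.add s t = s ++ [t] := by simp [PySem.Set.add, hnm]
      simp only [List.foldl_cons]
      rw [if_pos (by simp [hnm]), ← hadd]
      exact ih (PySem.Set.add s t)

-- ===== VERDICT (by name: the statement is the Claim_ definition above) =====
theorem summarize_matched_terms_spec : Claim_equal_summarize_matched_terms := by
  intro patterns _
  show summarize_matched_terms patterns = summarize_matched_terms_alt patterns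
  simp only [summarize_matched_terms, summarize_matched_terms_alt]
  rw [PySem.List.foldl_append_singleton_eq_map]
  simp only [List.nil_append]
  rw [show (PySem.Set.empty, ([] : List String)) = ((PySem.Set.empty : PySem.Set String), (PySem.Set.empty : PySem.Set String)) from rfl,
      pv_fold_pair]
  simp only [pv_token_eq, PySem.List.dedup_eq_ofList, PySem.Set.ofList_eq_foldl]
  rfl
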